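-- pv_equiv track=rewrite | github.com/bamonroe/Covid19Experiment | risk_task/models.py | getAvals
-- ===== SOURCE A (Python) =====
-- def getAvals(row):
--     ocounter = 0
--     while True:
--         try:
--             tmp = row["A" + str(ocounter)]
--             ocounter = ocounter + 1
--         except:
--             ocounter = ocounter - 1
--             break
--     return ocounter
-- ===== SOURCE B (Python) =====
-- def getAvals(row):
--     # One pass over the dict: map every expected key "A0".."An" to its index once,
--     # mark which indices actually occur, then take the first gap (the mex) minus one.
--     n = len(row)
--     idx = {"A" + str(i): i for i in range(n + 1)}
--     present = [False] * (n + 1)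
--     for key in row:
--         j = idx.get(key)
--         if j is not None:
--             present[j] = True
--     i = 0
--     while present[i]:
--         i += 1
--     return i - 1
-- ===== Notes on version B (the rewrite author's own statement) =====
-- stated objective: alternative
-- what changed: A probes the dict key by key (A0, A1, ...) until a lookup fails; B makes a single pass over the dict's own keys, marking which indices of the expected contiguous block occur, and returns the first missing index minus one.
import Mathlib
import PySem

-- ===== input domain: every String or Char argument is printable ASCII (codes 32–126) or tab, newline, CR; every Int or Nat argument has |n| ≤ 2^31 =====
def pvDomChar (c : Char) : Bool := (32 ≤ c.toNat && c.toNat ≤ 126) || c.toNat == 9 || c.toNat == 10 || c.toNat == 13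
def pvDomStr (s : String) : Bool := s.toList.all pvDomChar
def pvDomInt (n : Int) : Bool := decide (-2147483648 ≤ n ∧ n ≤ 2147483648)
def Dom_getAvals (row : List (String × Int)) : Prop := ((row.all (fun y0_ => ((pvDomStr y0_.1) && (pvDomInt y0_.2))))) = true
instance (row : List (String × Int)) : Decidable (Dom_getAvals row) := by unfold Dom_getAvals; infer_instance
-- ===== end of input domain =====

-- B replaces A's key-by-key dict probing (A0, A1, ... until a lookup fails) by one pass over the
-- dict's own keys that marks which indices of the expected contiguous block occur, then returns the
-- first missing index minus one; same result, a different traversal (alternative decomposition).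


-- ===== PORT A =====
-- 'while True: try: row["A"+str(ocounter)]; ocounter += 1 except: ocounter -= 1; break'.
-- Fuel = len(row)+1 is a totality guard only: the loop checks distinct keys, so it must find a
-- missing one within len(row)+1 probes; the fuel-0 branch returns the same saturated value.
def getAvalsLoop (row : List (String × Int)) : Nat → Int → Int
  | 0, ocounter => ocounter - 1
  | fuel + 1, ocounter =>
    match (PySem.Dict.mk row).get? ("A" ++ PySem.Int.toStr ocounter) with
    | some _ => getAvalsLoop row fuel (ocounter + 1)
    | none => ocounter - 1

def getAvals (row : List (String × Int)) : Int := getAvalsLoop row (row.length + 1) 0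

-- ===== PORT B =====
-- 'i = 0; while present[i]: i += 1; return i - 1' as the structural scan of the present list
-- (the nil case is Python's out-of-range read, unreachable: a False entry always exists).
def scanPresent : List Bool → Int → Int
  | [], i => i - 1
  | b :: rest, i => if b then scanPresent rest (i + 1) else i - 1

def getAvals_alt (row : List (String × Int)) : Int :=
  let n := row.length
  let idx : PySem.Dict String Int :=
    (PySem.List.pyRange 0 ((n : Int) + 1) 1).foldl
      (fun d i => d.insert ("A" ++ PySem.Int.toStr i) i) PySem.Dict.empty
  let present : List Bool :=
    row.foldl (fun p kv =>
      match idx.get? kv.1 with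
      | some j => PySem.List.pySetD p j true
      | none => p) (List.replicate (n + 1) false)
  scanPresent present 0

-- ===== PRECONDITION & SPEC =====
def Spec_getAvals (row : List (String × Int)) (out : Int) : Prop := out = getAvals_alt row
instance (row : List (String × Int)) (out : Int) : Decidable (Spec_getAvals row out) := by unfold Spec_getAvals; infer_instance

-- ===== CLAIM (what is proved, stated in full; the proofs are below) =====
def Claim_equal_getAvals : Prop := ∀ (row : List (String × Int)), Dom_getAvals row → Spec_getAvals row (getAvals row)

-- ===== LEMMAS AND PROOFS =====

-- str(i) for i : Nat, as a plain structural function on Nat (last digit appended).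
def dig (n : Nat) : List Char :=
  if _h : n < 10 then [Nat.digitChar n]
  else dig (n / 10) ++ [Nat.digitChar (n % 10)]
  decreasing_by exact Nat.div_lt_self (by omega) (by omega)

lemma dig_lt {n : Nat} (h : n < 10) : dig n = [Nat.digitChar n] := by
  rw [dig]; simp [h]

lemma dig_ge {n : Nat} (h : ¬ n < 10) : dig n = dig (n / 10) ++ [Nat.digitChar (n % 10)] := by
  rw [dig]; simp [h]

lemma dig_ne_nil (n : Nat) : dig n ≠ [] := by
  rw [dig]; split_ifs <;> simp

lemma toDigitsCore_eq_dig :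
    ∀ (f n : Nat) (acc : List Char), n < f →
      Nat.toDigitsCore 10 f n acc = dig n ++ acc := by
  intro f
  induction f with
  | zero => omega
  | succ f ih =>
    intro n acc h
    rw [Nat.toDigitsCore, dig]
    by_cases h10 : n < 10
    · have hd : n / 10 = 0 := Nat.div_eq_of_lt h10
      simp [hd, h10, Nat.mod_eq_of_lt h10]
    · have hd : ¬ n / 10 = 0 := by
        intro hz; exact h10 (by omega)
      have hlt : n / 10 < f := by
        have := Nat.div_lt_self (show 0 < n by omega) (show 1 < 10 by omega)
        omega
      simp only [hd, if_false, h10]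
      rw [ih (n / 10) _ hlt]
      simp

lemma digitChar_inj {m n : Nat} (hm : m < 10) (hn : n < 10)
    (h : Nat.digitChar m = Nat.digitChar n) : m = n := by
  interval_cases m <;> interval_cases n <;> revert h <;> decide

lemma dig_inj : ∀ (m n : Nat), dig m = dig n → m = n := by
  intro m
  induction m using Nat.strong_induction_on with
  | _ m ih =>
    intro n h
    by_cases hm : m < 10 <;> by_cases hn : n < 10
    · rw [dig_lt hm, dig_lt hn] at h
      simp only [List.cons.injEq] at h
      exact digitChar_inj hm hn h.1
    · exfalso
      rw [dig_lt hm, dig_ge hn] at h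
      have h1 : (dig (n / 10)).length ≠ 0 := by
        simpa [List.length_eq_zero_iff] using dig_ne_nil (n / 10)
      have := congrArg List.length h
      simp only [List.length_append, List.length_cons, List.length_nil] at this
      omega
    · exfalso
      rw [dig_ge hm, dig_lt hn] at h
      have h1 : (dig (m / 10)).length ≠ 0 := by
        simpa [List.length_eq_zero_iff] using dig_ne_nil (m / 10)
      have := congrArg List.length h
      simp only [List.length_append, List.length_cons, List.length_nil] at this
      omega
    · rw [dig_ge hm, dig_ge hn] at h
      have h' := congrArg List.reverse h
      simp only [List.reverse_append, List.reverse_cons, List.reverse_nil,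
        List.nil_append, List.cons_append, List.cons.injEq] at h'
      obtain ⟨hlast, hrev⟩ := h'
      have hdiv : m / 10 = n / 10 := by
        apply ih (m / 10) (Nat.div_lt_self (by omega) (by omega))
        have := congrArg List.reverse hrev
        simpa using this
      have hmod : m % 10 = n % 10 :=
        digitChar_inj (Nat.mod_lt _ (by omega)) (Nat.mod_lt _ (by omega)) hlast
      omega

-- The key A's loop probes at counter i, and the one B's index maps back from.
def keyOf (i : Nat) : String := "A" ++ PySem.Int.toStr (i : Int)

lemma toChars_natCast (i : Nat) : PySem.Int.toChars (i : Int) = dig i := by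
  have h0 : ¬ ((i : Int) < 0) := by omega
  simp only [PySem.Int.toChars, if_neg h0, Int.toNat_natCast]
  show Nat.toDigits 10 i = dig i
  rw [Nat.toDigits, toDigitsCore_eq_dig (i + 1) i [] (by omega)]
  simp

lemma keyOf_inj {i j : Nat} (h : keyOf i = keyOf j) : i = j := by
  apply dig_inj
  have h' := congrArg String.toList h
  simp only [keyOf, String.toList_append, PySem.Int.toList_toStr, toChars_natCast] at h'
  simpa using h'

-- membership of a key in the dict, as A's lookup sees it
def Pmem (row : List (String × Int)) (i : Nat) : Bool :=
  ((PySem.Dict.mk row).get? (keyOf i)).isSome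

lemma get?_mk_isSome (row : List (String × Int)) (k : String) :
    ((PySem.Dict.mk row).get? k).isSome = decide (k ∈ row.map Prod.fst) := by
  induction row with
  | nil => simp [PySem.Dict.get?]
  | cons kv rest ih =>
    rw [show (PySem.Dict.mk (kv :: rest)) = PySem.Dict.mk ((kv.1, kv.2) :: rest) by simp]
    rw [PySem.Dict.get?_mk_cons]
    by_cases h : kv.1 = k
    · simp [h]
    · simp only [beq_iff_eq, h, if_false, ih, List.map_cons, List.mem_cons]
      simp [Ne.symm h]

-- the dict {"A"+str(i): i for i in range(m)}
def idxUpTo (m : Nat) : PySem.Dict String Int :=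
  (PySem.List.pyRange 0 (m : Int) 1).foldl
    (fun d i => d.insert ("A" ++ PySem.Int.toStr i) i) PySem.Dict.empty

lemma idxUpTo_succ (m : Nat) :
    idxUpTo (m + 1) = (idxUpTo m).insert (keyOf m) (m : Int) := by
  unfold idxUpTo
  rw [show ((m + 1 : Nat) : Int) = (m : Int) + 1 by push_cast; ring]
  rw [PySem.List.pyRange_one_succ_right (by omega)]
  simp [keyOf]

lemma idxUpTo_get?_eq (m i : Nat) (h : i < m) :
    (idxUpTo m).get? (keyOf i) = some (i : Int) := by
  induction m with
  | zero => omega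
  | succ m ih =>
    rw [idxUpTo_succ]
    by_cases hi : i = m
    · subst hi; exact PySem.Dict.get?_insert_self _ _ _
    · rw [PySem.Dict.get?_insert_of_ne]
      · exact ih (by omega)
      · intro hk; exact hi (keyOf_inj hk)

lemma idxUpTo_get?_some (m : Nat) (k : String) (v : Int)
    (h : (idxUpTo m).get? k = some v) :
    ∃ i : Nat, i < m ∧ k = keyOf i ∧ v = (i : Int) := by
  induction m with
  | zero =>
    exfalso
    have : (idxUpTo 0).get? k = none := by
      unfold idxUpTo
      rw [PySem.List.pyRange_one_eq_nil (by omega)]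
      simp [PySem.Dict.empty, PySem.Dict.get?]
    rw [this] at h; simp at h
  | succ m ih =>
    rw [idxUpTo_succ] at h
    by_cases hk : keyOf m = k
    · subst hk
      rw [PySem.Dict.get?_insert_self] at h
      exact ⟨m, by omega, rfl, (Option.some.injEq _ _).mp h.symm⟩
    · rw [PySem.Dict.get?_insert_of_ne _ _ (fun hx => hk hx.symm)] at h
      obtain ⟨i, hi, hk', hv⟩ := ih h
      exact ⟨i, by omega, hk', hv⟩

-- first-absent scan, the common shape of both programs
def ffa (row : List (String × Int)) : Nat → Nat → Nat
  | 0, k => k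
  | f + 1, k => if Pmem row k then ffa row f (k + 1) else k

lemma loopA_eq (row : List (String × Int)) :
    ∀ (f k : Nat), getAvalsLoop row f (k : Int) = ((ffa row f k : Int)) - 1 := by
  intro f
  induction f with
  | zero => intro k; rfl
  | succ f ih =>
    intro k
    rw [getAvalsLoop, ffa]
    have : ("A" ++ PySem.Int.toStr (k : Int)) = keyOf k := rfl
    rw [this]
    cases h : (PySem.Dict.mk row).get? (keyOf k) with
    | none => simp [Pmem, h]
    | some v =>
      have hp : Pmem row k = true := by simp [Pmem, h]
      rw [hp, if_pos rfl]
      rw [show (k : Int) + 1 = ((k + 1 : Nat) : Int) by push_cast; ring]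
      exact ih (k + 1)

lemma scan_eq (row : List (String × Int)) :
    ∀ (p : List Bool) (s : Nat),
      (∀ i, i < p.length → p.getD i false = Pmem row (s + i)) →
      scanPresent p (s : Int) = ((ffa row p.length s : Int)) - 1 := by
  intro p
  induction p with
  | nil => intro s _; rfl
  | cons b rest ih =>
    intro s hp
    have hb : b = Pmem row s := by simpa using hp 0 (by simp)
    rw [scanPresent, List.length_cons, ffa, ← hb]
    cases b with
    | false => simp
    | true =>
      rw [if_pos rfl, if_pos rfl]
      rw [show (s : Int) + 1 = ((s + 1 : Nat) : Int) by push_cast; ring]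
      apply ih
      intro i hi
      have := hp (i + 1) (by simpa using hi)
      simpa [Nat.add_comm, Nat.add_left_comm] using this

-- the fold that marks present indices, characterised entry-wise
lemma foldl_mark_length (idx : PySem.Dict String Int) :
    ∀ (rs : List (String × Int)) (p : List Bool),
      (rs.foldl (fun p kv =>
        match idx.get? kv.1 with
        | some j => PySem.List.pySetD p j true
        | none => p) p).length = p.length := by
  intro rs
  induction rs with
  | nil => intro p; rfl
  | cons kv rest ih =>
    intro p
    rw [List.foldl_cons, ih]
    cases h : idx.get? kv.1 with
    | none => simp
    | some j => simp [PySem.List.length_pySetD]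

lemma foldl_mark_getD (n : Nat) :
    ∀ (rs : List (String × Int)) (p : List Bool), p.length = n + 1 →
      ∀ i, i < n + 1 →
      (rs.foldl (fun p kv =>
        match (idxUpTo (n + 1)).get? kv.1 with
        | some j => PySem.List.pySetD p j true
        | none => p) p).getD i false
      = (p.getD i false || decide (keyOf i ∈ rs.map Prod.fst)) := by
  intro rs
  induction rs with
  | nil => intro p hlen i hi; simp
  | cons kv rest ih =>
    intro p hlen i hi
    rw [List.foldl_cons]
    cases h : (idxUpTo (n + 1)).get? kv.1 with
    | none =>
      have hne : keyOf i ≠ kv.1 := by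
        intro hk
        rw [← hk, idxUpTo_get?_eq (n + 1) i hi] at h
        simp at h
      rw [ih p hlen i hi]
      rw [show decide (keyOf i ∈ List.map Prod.fst (kv :: rest))
            = decide (keyOf i ∈ List.map Prod.fst rest) from
        decide_eq_decide.mpr (by simp [hne])]
    | some j =>
      obtain ⟨i', hi', hk, hv⟩ := idxUpTo_get?_some (n + 1) kv.1 j h
      subst hv
      have hred : (match some ((i' : Nat) : Int) with
          | some j => PySem.List.pySetD p j true
          | none => p) = PySem.List.pySetD p ((i' : Nat) : Int) true := rfl
      rw [hred, show PySem.List.pySetD p ((i' : Nat) : Int) true = p.set i' true from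
        PySem.List.pySetD_natCast p i' true]
      rw [ih (p.set i' true) (by simpa using hlen) i hi]
      have hset : (p.set i' true).getD i false =
          (if i' = i then true else p.getD i false) := by
        simp only [List.getD, List.getElem?_set]
        by_cases hii : i' = i
        · subst hii; simp [show i' < p.length from by omega]
        · simp [hii]
      rw [hset]
      by_cases hii : i' = i
      · subst hii
        rw [if_pos rfl]
        rw [show decide (keyOf i' ∈ List.map Prod.fst (kv :: rest)) = true from
          decide_eq_true (by simp [hk])]
        simp
      · have hne : keyOf i ≠ kv.1 := by
          rw [hk]; intro hk'; exact hii (keyOf_inj hk').symm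
        rw [if_neg hii]
        rw [show decide (keyOf i ∈ List.map Prod.fst (kv :: rest))
              = decide (keyOf i ∈ List.map Prod.fst rest) from
          decide_eq_decide.mpr (by simp [hne])]

-- assembling B
lemma getAvals_alt_eq (row : List (String × Int)) :
    getAvals_alt row = ((ffa row (row.length + 1) 0 : Int)) - 1 := by
  unfold getAvals_alt
  simp only []
  set n := row.length with hn
  have hidx : (PySem.List.pyRange 0 ((n : Int) + 1) 1).foldl
      (fun d i => d.insert ("A" ++ PySem.Int.toStr i) i) PySem.Dict.empty = idxUpTo (n + 1) := by
    unfold idxUpTo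
    rw [show ((n + 1 : Nat) : Int) = (n : Int) + 1 by push_cast; ring]
  rw [hidx]
  set present := row.foldl (fun p kv =>
      match (idxUpTo (n + 1)).get? kv.1 with
      | some j => PySem.List.pySetD p j true
      | none => p) (List.replicate (n + 1) false) with hpres
  have hlen : present.length = n + 1 := by
    rw [hpres, foldl_mark_length]; simp
  have hgetD : ∀ i, i < n + 1 → present.getD i false = Pmem row i := by
    intro i hi
    rw [hpres, foldl_mark_getD n row (List.replicate (n + 1) false) (by simp) i hi]
    rw [Pmem, get?_mk_isSome]
    simp
  have := scan_eq row present 0 (by intro i hi; rw [hlen] at hi; simpa using hgetD i hi)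
  rw [hlen] at this
  simpa using this

-- ===== VERDICT (by name: the statement is the Claim_ definition above) =====
theorem getAvals_spec : Claim_equal_getAvals := by
  intro row _
  show getAvals row = getAvals_alt row
  rw [getAvals_alt_eq]
  unfold getAvals
  exact loopA_eq row (row.length + 1) 0
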